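-- pv_equiv track=rewrite | github.com/RamnathShanbhag/APS-2020 | minimum_num_of_cubes_sum_is_given_n_recursive.py | minCubes
-- ===== SOURCE A (Python) =====
-- def minCubes(n):
-- 	if(n<8):
-- 		return n
-- 	res=n
-- 	for i in range(1,n+1):
-- 		if((i*i*i)>n):
-- 			return res
-- 		res=min(res,minCubes(n-(i*i*i))+1)
-- 	return res
-- ===== SOURCE B (Python) =====
-- def minCubes(n):
--     # Bottom-up DP over values 0..n instead of A's exponential recursion.
--     if n < 8:
--         return n
--     cubes = []
--     i = 1
--     while i * i * i <= n:
--         cubes.append(i * i * i)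
--         i += 1
--     dp = [0]
--     for k in range(1, n + 1):
--         best = k
--         for c in cubes:
--             if c > k:
--                 break
--             best = min(best, dp[k - c] + 1)
--         dp.append(best)
--     return dp[n]
-- ===== Notes on version B (the rewrite author's own statement) =====
-- stated objective: faster
-- what changed: Replaced A's exponential top-down recursion (re-solving each subproblem many times) by a bottom-up dynamic program that fills a table dp[0..n] once, trying each cube at each value; Pre_ excludes large n on which A's linear-depth recursion exceeds CPython's recursion limit and raises RecursionError.
import Mathlib
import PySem

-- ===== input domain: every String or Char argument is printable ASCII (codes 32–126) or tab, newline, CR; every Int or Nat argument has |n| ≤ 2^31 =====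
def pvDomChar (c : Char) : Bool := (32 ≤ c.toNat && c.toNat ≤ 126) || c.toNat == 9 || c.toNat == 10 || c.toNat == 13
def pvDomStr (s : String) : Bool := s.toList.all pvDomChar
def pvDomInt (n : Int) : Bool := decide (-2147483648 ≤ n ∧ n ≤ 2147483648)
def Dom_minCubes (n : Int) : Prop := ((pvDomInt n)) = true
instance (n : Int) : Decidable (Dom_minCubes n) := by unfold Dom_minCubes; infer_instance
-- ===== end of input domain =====

-- B replaces A's exponential recursion with a bottom-up DP table; measurably faster (asymptotic).

-- ===== PORT A =====
-- A's 'for i in range(1, n+1)' early-returns at the first i with i*i*i > n, so the loop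
-- body runs exactly over the takeWhile-prefix of the range; ported as a fold over that prefix
-- (attach carries membership for the termination measure).
def minCubes (n : Int) : Int :=
  if n < 8 then n
  else
    (((PySem.List.pyRange 1 (n+1)).takeWhile (fun i => decide (i*i*i ≤ n))).attach).foldl
      (fun res i => min res (minCubes (n - i.1*i.1*i.1) + 1)) n
termination_by n.toNat
decreasing_by
  have h2 : (1:Int) ≤ i.1 := by
    have hm : i.1 ∈ PySem.List.pyRange 1 (n+1) :=
      (List.takeWhile_sublist _).mem i.2
    exact (PySem.List.mem_pyRange_one.mp hm).1
  have h3 : (1:Int) ≤ i.1 * i.1 * i.1 := by nlinarith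
  omega

-- ===== PORT B =====
-- the 'while i*i*i <= n' cube-collecting loop of Source B (the '1 ≤ i' conjunct is a totality
-- guard only: the loop starts at i = 1 and increments)
def cubesLoop (n i : Int) : List Int :=
  if h : 1 ≤ i ∧ i*i*i ≤ n then (i*i*i) :: cubesLoop n (i+1) else []
termination_by (n + 1 - i).toNat
decreasing_by
  have : i ≤ i*i*i := by nlinarith [h.1]
  omega

-- the inner 'for c in cubes: if c > k: break; best = min(best, dp[k-c]+1)' loop of Source B
def innerLoop (cubes dp : List Int) (k : Int) : Int :=
  (cubes.takeWhile (fun c => decide (c ≤ k))).foldl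
    (fun best c => min best (PySem.List.pyGetD dp (k - c) 0 + 1)) k

def minCubes_alt (n : Int) : Int :=
  if n < 8 then n
  else
    let cubes := cubesLoop n 1
    let dp := (PySem.List.pyRange 1 (n+1)).foldl
      (fun dp k => dp ++ [innerLoop cubes dp k]) [0]
    PySem.List.pyGetD dp n 0

-- ===== PRECONDITION & SPEC =====
-- Pre_ excludes large n, on which Python A's linear-depth recursion (depth ~ n) exceeds
-- CPython's recursion limit and raises RecursionError (observed from n ≈ 1000; 900 leaves margin).
def Pre_minCubes (n : Int) : Prop := n ≤ 900
instance (n : Int) : Decidable (Pre_minCubes n) := by unfold Pre_minCubes; infer_instance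
def pvWitness_minCubes : Int := (20)
def Spec_minCubes (n : Int) (out : Int) : Prop := out = minCubes_alt n
instance (n : Int) (out : Int) : Decidable (Spec_minCubes n out) := by unfold Spec_minCubes; infer_instance

-- ===== CLAIM (what is proved, stated in full; the proofs are below) =====
def Claim_equal_minCubes : Prop := ∀ (n : Int), Dom_minCubes n → Pre_minCubes n → Spec_minCubes n (minCubes n)

-- ===== LEMMAS AND PROOFS =====

-- A returns its argument below 8
lemma minCubes_small {k : Int} (h : k < 8) : minCubes k = k := by
  rw [minCubes]; simp [h]

-- every element of cubesLoop n i (for i ≥ 1) is between 1 and n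
lemma cubesLoop_mem {n : Int} : ∀ (m : Nat) (i : Int), 1 ≤ i → (n + 1 - i).toNat ≤ m →
    ∀ c ∈ cubesLoop n i, 1 ≤ c ∧ c ≤ n := by
  intro m
  induction m with
  | zero =>
    intro i hi hm c hc
    rw [cubesLoop] at hc
    split at hc
    · rename_i h
      have : i ≤ i*i*i := by nlinarith
      omega
    · simp at hc
  | succ m ih =>
    intro i hi hm c hc
    rw [cubesLoop] at hc
    split at hc
    · rename_i h
      have hii : i ≤ i*i*i := by nlinarith
      rcases List.mem_cons.mp hc with rfl | hc'
      · exact ⟨by nlinarith, h.2⟩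
      · exact ih (i+1) (by omega) (by omega) c hc'
    · simp at hc

lemma cubesLoop_mem' {n c i : Int} (hi : 1 ≤ i) (hc : c ∈ cubesLoop n i) : 1 ≤ c ∧ c ≤ n :=
  cubesLoop_mem (n + 1 - i).toNat i hi le_rfl c hc

-- truncating the cube list for n at k gives exactly the cube list for k
lemma cubesLoop_takeWhile {n k : Int} (_hk0 : 0 ≤ k) (hkn : k ≤ n) :
    ∀ (m : Nat) (i : Int), 1 ≤ i → (n + 1 - i).toNat ≤ m →
    (cubesLoop n i).takeWhile (fun c => decide (c ≤ k)) = cubesLoop k i := by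
  intro m
  induction m with
  | zero =>
    intro i hi hm
    have hii : i ≤ i*i*i := by nlinarith
    conv_lhs => rw [cubesLoop]
    conv_rhs => rw [cubesLoop]
    rw [dif_neg (show ¬ (1 ≤ i ∧ i*i*i ≤ n) by intro hh; omega)]
    rw [dif_neg (show ¬ (1 ≤ i ∧ i*i*i ≤ k) by intro hh; omega)]
    simp
  | succ m ih =>
    intro i hi hm
    have hii : i ≤ i*i*i := by nlinarith
    conv_lhs => rw [cubesLoop]
    conv_rhs => rw [cubesLoop]
    by_cases hn' : i*i*i ≤ n
    · rw [dif_pos ⟨hi, hn'⟩]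
      by_cases hck : i*i*i ≤ k
      · rw [List.takeWhile_cons_of_pos (by simpa using hck)]
        rw [dif_pos ⟨hi, hck⟩]
        rw [ih (i+1) (by omega) (by omega)]
      · rw [List.takeWhile_cons_of_neg (by simpa using hck)]
        rw [dif_neg (show ¬ (1 ≤ i ∧ i*i*i ≤ k) by intro hh; exact hck hh.2)]
    · rw [dif_neg (show ¬ (1 ≤ i ∧ i*i*i ≤ n) by intro hh; exact hn' hh.2)]
      rw [dif_neg (show ¬ (1 ≤ i ∧ i*i*i ≤ k) by intro hh; exact hn' (le_trans hh.2 hkn))]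
      simp
-- A's i-prefix (i with i³ ≤ k), mapped to cubes, is exactly cubesLoop k
lemma range_takeWhile_map_cubes {k : Int} (_hk0 : 0 ≤ k) :
    ∀ (m : Nat) (i : Int), 1 ≤ i → (k + 1 - i).toNat ≤ m →
    ((PySem.List.pyRange i (k+1)).takeWhile (fun j => decide (j*j*j ≤ k))).map
      (fun j => j*j*j) = cubesLoop k i := by
  intro m
  induction m with
  | zero =>
    intro i hi hm
    have hii : i ≤ i*i*i := by nlinarith
    rw [PySem.List.pyRange_one_eq_nil (by omega)]
    conv_rhs => rw [cubesLoop]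
    rw [dif_neg (show ¬ (1 ≤ i ∧ i*i*i ≤ k) by intro hh; omega)]
    simp
  | succ m ih =>
    intro i hi hm
    have hii : i ≤ i*i*i := by nlinarith
    conv_rhs => rw [cubesLoop]
    by_cases hik : i < k + 1
    · rw [PySem.List.pyRange_one_cons hik]
      by_cases hc : i*i*i ≤ k
      · rw [List.takeWhile_cons_of_pos (by simpa using hc)]
        rw [dif_pos ⟨hi, hc⟩, List.map_cons]
        rw [ih (i+1) (by omega) (by omega)]
      · rw [List.takeWhile_cons_of_neg (by simpa using hc)]
        rw [dif_neg (show ¬ (1 ≤ i ∧ i*i*i ≤ k) by intro hh; exact hc hh.2)]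
        simp
    · rw [PySem.List.pyRange_one_eq_nil (by omega)]
      rw [dif_neg (show ¬ (1 ≤ i ∧ i*i*i ≤ k) by intro hh; omega)]
      simp

-- A's value at k, rewritten as a fold over the cube list (for k ≥ 8)
lemma minCubes_eq_cubes_fold {k : Int} (hk : ¬ k < 8) :
    minCubes k = (cubesLoop k 1).foldl (fun res c => min res (minCubes (k - c) + 1)) k := by
  conv_lhs => rw [minCubes]
  rw [if_neg hk]
  refine Eq.trans (@List.foldl_attach Int Int
    ((PySem.List.pyRange 1 (k+1)).takeWhile (fun i => decide (i*i*i ≤ k)))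
    (fun res c => min res (minCubes (k - c*c*c) + 1)) k) ?_
  rw [← range_takeWhile_map_cubes (show (0:Int) ≤ k by omega) (k + 1 - 1).toNat 1 le_rfl le_rfl]
  rw [List.foldl_map]

-- the DP step computes A's value: innerLoop over dp = [A(0),…,A(k-1)] at k gives A(k)
lemma innerLoop_eq {n k : Int} (_hn : ¬ n < 8) (hk1 : 1 ≤ k) (hkn : k ≤ n) :
    innerLoop (cubesLoop n 1) ((List.range k.toNat).map (fun (j : Nat) => minCubes (j : Int))) k
      = minCubes k := by
  unfold innerLoop
  rw [cubesLoop_takeWhile (by omega) hkn (n + 1 - 1).toNat 1 le_rfl le_rfl]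
  have hfold :
      (cubesLoop k 1).foldl
        (fun best c => min best
          (PySem.List.pyGetD ((List.range k.toNat).map (fun (j : Nat) => minCubes (j : Int))) (k - c) 0 + 1)) k
      = (cubesLoop k 1).foldl (fun best c => min best (minCubes (k - c) + 1)) k := by
    apply PySem.List.foldl_congr_mem
    intro acc c hc
    obtain ⟨hc1, hck⟩ := cubesLoop_mem' le_rfl hc
    have hlen : (((List.range k.toNat).map (fun (j : Nat) => minCubes (j : Int)))).length = k.toNat := by
      simp
    rw [PySem.List.pyGetD_eq_getElem _ _ (by omega) (by rw [hlen]; omega)]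
    rw [List.getElem_map, List.getElem_range]
    have : ((k - c).toNat : Int) = k - c := by omega
    rw [this]
  rw [hfold]
  by_cases hk8 : k < 8
  · -- 1 ≤ k < 8: the only cube ≤ k is 1, and the fold gives min k ((k-1)+1) = k
    have hc1 : cubesLoop k 1 = [1] := by
      rw [cubesLoop]
      rw [dif_pos (show (1:Int) ≤ 1 ∧ 1*1*1 ≤ k by norm_num; omega)]
      rw [cubesLoop]
      rw [dif_neg (show ¬ ((1:Int) ≤ 1+1 ∧ (1+1)*(1+1)*(1+1) ≤ k) by norm_num; omega)]
      norm_num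
    rw [hc1, minCubes_small hk8]
    simp only [List.foldl_cons, List.foldl_nil]
    rw [minCubes_small (by omega : k - 1 < 8)]
    omega
  · exact (minCubes_eq_cubes_fold hk8).symm

-- the DP fold invariant: after the values 1..t, dp is [A(0),…,A(t)]
lemma dp_invariant {n : Int} (hn : ¬ n < 8) :
    ∀ (t : Nat), (t : Int) ≤ n →
    (PySem.List.pyRange 1 ((t : Int) + 1)).foldl
        (fun dp k => dp ++ [innerLoop (cubesLoop n 1) dp k]) [0]
      = (List.range (t + 1)).map (fun (j : Nat) => minCubes (j : Int)) := by
  intro t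
  induction t with
  | zero =>
    intro _
    rw [PySem.List.pyRange_one_eq_nil (by norm_num)]
    simp [List.range_succ, minCubes_small (show (0:Int) < 8 by norm_num)]
  | succ t ih =>
    intro ht
    have hcast : (((t + 1 : Nat)) : Int) + 1 = ((t : Int) + 1) + 1 := by push_cast; ring
    rw [hcast, PySem.List.pyRange_one_succ_right (by omega), List.foldl_append]
    rw [ih (by omega)]
    simp only [List.foldl_cons, List.foldl_nil]
    have hinner : innerLoop (cubesLoop n 1)
        ((List.range (t + 1)).map (fun (j : Nat) => minCubes (j : Int))) ((t : Int) + 1)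
        = minCubes ((t : Int) + 1) := by
      have h := innerLoop_eq hn (k := (t : Int) + 1) (by omega) (by omega)
      have hnat : ((t : Int) + 1).toNat = t + 1 := by omega
      rwa [hnat] at h
    rw [hinner]
    conv_rhs => rw [List.range_succ]
    rw [List.map_append]
    simp

theorem minCubes_alt_eq (n : Int) : minCubes_alt n = minCubes n := by
  unfold minCubes_alt
  by_cases hn : n < 8
  · rw [if_pos hn, minCubes_small hn]
  · rw [if_neg hn]
    have hn0 : 0 ≤ n := by omega
    have htn : ((n.toNat : Nat) : Int) = n := by omega
    have hdp := dp_invariant hn n.toNat (by omega)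
    rw [htn] at hdp
    simp only [hdp]
    have hlen : ((List.range (n.toNat + 1)).map (fun (j : Nat) => minCubes (j : Int))).length
        = n.toNat + 1 := by simp
    rw [PySem.List.pyGetD_eq_getElem _ _ hn0 (by rw [hlen]; omega)]
    rw [List.getElem_map, List.getElem_range, htn]

-- ===== VERDICT (by name: the statement is the Claim_ definition above) =====
theorem minCubes_spec : Claim_equal_minCubes := by
  intro n _ _
  unfold Spec_minCubes
  exact (minCubes_alt_eq n).symm
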